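-- pv_equiv track=rewrite | github.com/Adrian13155/UnifiedPansharpening | channel_Adapt/DynamicChannelAdaptation.py | auto_conv_params
-- ===== SOURCE A (Python) =====
-- def auto_conv_params( #根据输入Kernel_Size和Stride等自适应计算padding
--
--     input_size: int,       # 输入特征图大小，例如 16
--     output_size: int,      # 目标输出图大小，例如 64
--     kernel_size: int,      # 卷积核大小，例如 9
--     stride: int            # 步长，例如 4
-- ):
--     for padding in range(kernel_size):
--         calc_out = (input_size + 2 * padding - kernel_size) // stride + 1
--         if calc_out == output_size:
--             return padding
--     raise ValueError("No valid padding found to reach desired output size.")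
-- ===== SOURCE B (Python) =====
-- def auto_conv_params(
--     input_size: int,
--     output_size: int,
--     kernel_size: int,
--     stride: int
-- ):
--     # Smallest padding p with floor((input_size + 2p - kernel_size)/stride) + 1
--     # == output_size: solve the lower bound by one ceiling division, then verify.
--     numer = stride * (output_size - 1) - (input_size - kernel_size)
--     padding = max(0, -((-numer) // 2))
--     if padding < kernel_size and (input_size + 2 * padding - kernel_size) // stride + 1 == output_size:
--         return padding
--     raise ValueError("No valid padding found to reach desired output size.")
-- ===== Notes on version B (the rewrite author's own statement) =====
-- stated objective: faster
-- what changed: Replaced the linear scan over paddings with a closed-form solve (one ceiling division for the smallest candidate, verified once); Pre_ excludes stride <= 0, where stride = 0 raises ZeroDivisionError and a negative stride is outside a convolution's meaningful domain, A's padding there being an artefact of floor division by a negative divisor.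
-- outside the precondition, e.g. on auto_conv_params(10, -1, 3, -5): A returns 0, B raises ValueError
import Mathlib
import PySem

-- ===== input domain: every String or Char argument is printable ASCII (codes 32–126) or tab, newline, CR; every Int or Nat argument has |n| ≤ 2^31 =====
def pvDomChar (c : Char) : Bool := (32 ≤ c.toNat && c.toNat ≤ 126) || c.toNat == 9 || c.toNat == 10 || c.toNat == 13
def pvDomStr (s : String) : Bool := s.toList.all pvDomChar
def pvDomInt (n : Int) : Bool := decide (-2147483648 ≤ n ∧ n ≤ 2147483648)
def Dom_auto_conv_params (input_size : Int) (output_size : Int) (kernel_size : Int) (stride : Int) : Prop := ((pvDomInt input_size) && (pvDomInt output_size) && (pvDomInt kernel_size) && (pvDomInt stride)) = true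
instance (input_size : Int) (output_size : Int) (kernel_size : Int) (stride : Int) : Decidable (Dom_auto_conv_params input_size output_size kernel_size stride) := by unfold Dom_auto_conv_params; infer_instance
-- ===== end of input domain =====

-- B replaces A's linear scan over paddings with a closed-form solve (one ceiling
-- division, verified once); equivalence is proved on Pre_ (stride ≥ 1 and a valid
-- padding exists; elsewhere A raises, or the stride is ≤ 0 — see Pre_'s comment).

-- ===== PORT A =====
-- the loop 'for padding in range(kernel_size): … return padding' as structural recursion
-- over the remaining paddings (early return on the first hit, just like the Python loop)
def autoConvLoopA (input_size : Int) (output_size : Int) (kernel_size : Int) (stride : Int) (padding : Int) : Int :=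
  if _h : padding < kernel_size then
    if PySem.Int.floordiv (input_size + 2 * padding - kernel_size) stride + 1 == output_size then padding
    else autoConvLoopA input_size output_size kernel_size stride (padding + 1)
  else 0
termination_by (kernel_size - padding).toNat
decreasing_by omega

-- the Python ValueError on loop exhaustion is outside Pre_, the port returns 0 there
def auto_conv_params (input_size : Int) (output_size : Int) (kernel_size : Int) (stride : Int) : Int :=
  autoConvLoopA input_size output_size kernel_size stride 0

-- ===== PORT B =====
-- the Python ValueError (final 'raise') is outside Pre_, the port returns 0 there
def auto_conv_params_alt (input_size : Int) (output_size : Int) (kernel_size : Int) (stride : Int) : Int :=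
  let numer := stride * (output_size - 1) - (input_size - kernel_size)
  let padding := max 0 (-(PySem.Int.floordiv (-numer) 2))
  if padding < kernel_size ∧
      PySem.Int.floordiv (input_size + 2 * padding - kernel_size) stride + 1 == output_size then
    padding
  else 0

-- ===== PRECONDITION & SPEC =====
-- Pre_ excludes stride ≤ 0 (stride = 0 makes A raise ZeroDivisionError; a negative
-- stride is outside a convolution's meaningful domain and A's returned padding there
-- is an artefact of floor division by a negative divisor) and the no-solution inputs
-- on which A raises ValueError; the remaining conjuncts say, in closed form, that the
-- least candidate padding p0 = max(0, ceil((stride·(output_size-1) - input_size + kernel_size)/2))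
-- lies below kernel_size and within the floor-division interval — i.e. some padding works.
def Pre_auto_conv_params (input_size : Int) (output_size : Int) (kernel_size : Int) (stride : Int) : Prop :=
  1 ≤ stride ∧
  max 0 (-((input_size - kernel_size - stride * (output_size - 1)) / 2)) < kernel_size ∧
  input_size - kernel_size +
      2 * max 0 (-((input_size - kernel_size - stride * (output_size - 1)) / 2)) ≤
    stride * (output_size - 1) + stride - 1
instance (input_size : Int) (output_size : Int) (kernel_size : Int) (stride : Int) : Decidable (Pre_auto_conv_params input_size output_size kernel_size stride) := by unfold Pre_auto_conv_params; infer_instance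
def pvWitness_auto_conv_params : Int × Int × Int × Int := (16, 6, 9, 4)

def Spec_auto_conv_params (input_size : Int) (output_size : Int) (kernel_size : Int) (stride : Int) (out : Int) : Prop := out = auto_conv_params_alt input_size output_size kernel_size stride
instance (input_size : Int) (output_size : Int) (kernel_size : Int) (stride : Int) (out : Int) : Decidable (Spec_auto_conv_params input_size output_size kernel_size stride out) := by unfold Spec_auto_conv_params; infer_instance

-- ===== CLAIM (what is proved, stated in full; the proofs are below) =====
def Claim_equal_auto_conv_params : Prop := ∀ (input_size : Int) (output_size : Int) (kernel_size : Int) (stride : Int), Dom_auto_conv_params input_size output_size kernel_size stride → Pre_auto_conv_params input_size output_size kernel_size stride → Spec_auto_conv_params input_size output_size kernel_size stride (auto_conv_params input_size output_size kernel_size stride)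

-- ===== LEMMAS AND PROOFS =====

-- the loop condition as an interval bound on n = input_size + 2*padding - kernel_size
theorem floordiv_succ_eq_iff (n s o : Int) (hs : 0 < s) :
    (PySem.Int.floordiv n s + 1 = o) ↔
      (s * (o - 1) ≤ n ∧ n ≤ s * (o - 1) + s - 1) := by
  constructor
  · intro h
    have : PySem.Int.floordiv n s = o - 1 := by omega
    have := (PySem.Int.floordiv_eq_iff_of_pos hs).mp this
    constructor <;> nlinarith [this.1, this.2]
  · intro h
    have : PySem.Int.floordiv n s = o - 1 :=
      (PySem.Int.floordiv_eq_iff_of_pos hs).mpr (by constructor <;> nlinarith [h.1, h.2])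
    omega

-- A's loop lands on p0 when p0 is the first hit
theorem loopA_eq (i o k s p0 : Int) (hp0k : p0 < k)
    (hcond0 : PySem.Int.floordiv (i + 2 * p0 - k) s + 1 = o)
    (hnot : ∀ r : Int, 0 ≤ r → r < p0 → ¬(PySem.Int.floordiv (i + 2 * r - k) s + 1 = o)) :
    ∀ (n : Nat) (q : Int), 0 ≤ q → q ≤ p0 → (p0 - q).toNat = n → autoConvLoopA i o k s q = p0 := by
  intro n
  induction n with
  | zero =>
    intro q hq0 hqle hn
    have hq : q = p0 := by omega
    subst hq
    rw [autoConvLoopA, dif_pos hp0k, if_pos (by simpa using hcond0)]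
  | succ n ih =>
    intro q hq0 hqle hn
    rw [autoConvLoopA, dif_pos (by omega : q < k),
      if_neg (by simpa using hnot q hq0 (by omega))]
    exact ih (q + 1) (by omega) (by omega) (by omega)

-- ===== VERDICT =====
theorem auto_conv_params_spec : Claim_equal_auto_conv_params := by
  intro i o k s _ hpre
  obtain ⟨hs, hm1, hm2⟩ := hpre
  set L : Int := s * (o - 1) with hL
  have hdiv : PySem.Int.floordiv (-(s * (o - 1) - (i - k))) 2 = (i - k - L) / 2 := by
    rw [show (-(s * (o - 1) - (i - k))) = i - k - L by omega]
    exact PySem.Int.floordiv_eq_ediv_of_pos (by norm_num)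
  set p0 : Int := max 0 (-((i - k - L) / 2)) with hp0def
  have hceil : ∀ q : Int, (-((i - k - L) / 2) ≤ q) ↔ (L ≤ i - k + 2 * q) := by
    intro q; omega
  have hchar : ∀ q : Int, (PySem.Int.floordiv (i + 2 * q - k) s + 1 = o) ↔
      (L ≤ i + 2 * q - k ∧ i + 2 * q - k ≤ L + s - 1) := fun q =>
    floordiv_succ_eq_iff _ _ _ (by omega)
  have hp0nn : 0 ≤ p0 := le_max_left _ _
  have hLbound : L ≤ i + 2 * p0 - k := by
    have := (hceil p0).mp (le_max_right _ _); omega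
  have hcond0 : PySem.Int.floordiv (i + 2 * p0 - k) s + 1 = o :=
    (hchar p0).mpr ⟨hLbound, by omega⟩
  have hnot : ∀ q : Int, 0 ≤ q → q < p0 → ¬(PySem.Int.floordiv (i + 2 * q - k) s + 1 = o) := by
    intro q hq0 hqlt hcq
    have h1 := (hchar q).mp hcq
    have h2 : ¬(-((i - k - L) / 2) ≤ q) := by omega
    exact h2 ((hceil q).mpr (by omega))
  have hA : auto_conv_params i o k s = p0 := by
    unfold auto_conv_params
    exact loopA_eq i o k s p0 hm1 hcond0 hnot (p0 - 0).toNat 0 le_rfl hp0nn rfl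
  have hB : auto_conv_params_alt i o k s = p0 := by
    unfold auto_conv_params_alt
    dsimp only
    rw [hdiv, ← hp0def]
    exact if_pos ⟨hm1, by simpa using hcond0⟩
  unfold Spec_auto_conv_params
  rw [hA, hB]
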